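-- pv_equiv track=rewrite | github.com/jramaswami/Binary_Search_Python | sublist_with_largest_min_length_product.py | solve
-- ===== SOURCE A (Python) =====
-- from math import inf
--
-- def binsearch_left(A, lo, hi, x):
--     """
--     Return the index of the leftmost element in A[lo:hi+1] >= x.
--     A[lo:hi+1] will be sorted in descending order.
--     [5 4 3 2 1]
--     """
--     soln = hi + 1
--     while lo <= hi:
--         mid = lo + ((hi - lo) // 2)
--         if A[mid] >= x:
--             # This item is lower than or equal to x.  Since we are looking for
--             # the leftmost element less than x, see if there are any elements
--             # greater than  or equal to x to the left of here.
--             soln = min(soln, mid)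
--             hi = mid - 1
--         else:
--             # This item is more than x.  Since the elements are in descending
--             # order, we must look to the right of the curent position.
--             lo = mid + 1
--     return soln
--
-- def binsearch_right(A, lo, hi, x):
--     """
--     Return the index of the rightmost element in A[lo:hi+1] >= x.
--     A[lo:hi+1] will be sorted in asending order.
--     [1 2 3 4]
--     """
--     soln = lo - 1
--     while lo <= hi:
--         mid = lo + ((hi - lo) // 2)
--         if A[mid] >= x:
--             # This item is greater than or equal to x.  Since we are looking
--             # for the rightmost element less than x, see if there are any
--             # elements greater than or equal to than x to the right of here.
--             soln = max(soln, mid)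
--             lo = mid + 1
--         else:
--             # This item is more then x.  Since the elements are in descending
--             # order, look to the left.
--             hi = mid - 1
--     return soln
--
-- def solve(nums, pos):
--     min_to_pos = [inf for _ in nums]
--
--     # Right to left, from pos to 0.
--     curr_min = inf
--     for i in range(pos, -1, -1):
--         curr_min = min(curr_min, nums[i])
--         min_to_pos[i] = curr_min
--
--     # Left to right, from pos to len(nums) - 1
--     curr_min = inf
--     for i in range(pos, len(nums)):
--         curr_min = min(curr_min, nums[i])
--         min_to_pos[i] = curr_min
--
--     soln = nums[pos]
--     for i, k in enumerate(min_to_pos):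
--         if i < pos:
--             # Where is the rightmost element in A[pos+1:] where
--             # min_to_pos[i] is still the minimum.
--             j = binsearch_right(min_to_pos, pos, len(nums)-1, k)
--             if j >= pos:
--                 soln = max(soln, (j - i + 1) * k)
--         elif i > pos:
--             # Where is the rightmost element in A[0:pos] where min_to_pos[i]
--             # is still the minimum.
--             j = binsearch_left(min_to_pos, 0, pos, k)
--             if j <= pos:
--                 soln = max(soln, (i - j + 1) * k)
--     return soln
-- ===== SOURCE B (Python) =====
-- def solve(nums, pos):
--     n = len(nums)
--     # running minima by distance from pos:
--     # left[a] = min(nums[pos-a:pos+1]), right[b] = min(nums[pos:pos+b+1])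
--     left = [nums[pos]]
--     for a in range(1, pos + 1):
--         left.append(min(left[-1], nums[pos - a]))
--     right = [nums[pos]]
--     for b in range(1, n - pos):
--         right.append(min(right[-1], nums[pos + b]))
--     best = nums[pos]
--     # windows extending left by a > 0; pointer d = max right extension with right[d] >= k
--     d = 0
--     for a in range(1, pos + 1):
--         k = left[a]
--         while d < n - pos - 1 and right[d + 1] >= k:
--             d += 1
--         best = max(best, (a + d + 1) * k)
--     # windows extending right by b > 0; pointer e = max left extension with left[e] >= k
--     e = 0
--     for b in range(1, n - pos):
--         k = right[b]
--         while e < pos and left[e + 1] >= k: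
--             e += 1
--         best = max(best, (b + e + 1) * k)
--     return best
-- ===== Notes on version B (the rewrite author's own statement) =====
-- stated objective: faster
-- what changed: A precomputes the running-minimum array and then runs a binary search over it for every index; B replaces all binary searches by two monotone two-pointer sweeps outward from pos (the admissible extension only grows as the candidate minimum shrinks), giving O(n) instead of O(n log n).
-- outside the precondition, e.g. on solve([3, 1, 2], -1): A returns 2, B returns 4
import Mathlib
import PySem

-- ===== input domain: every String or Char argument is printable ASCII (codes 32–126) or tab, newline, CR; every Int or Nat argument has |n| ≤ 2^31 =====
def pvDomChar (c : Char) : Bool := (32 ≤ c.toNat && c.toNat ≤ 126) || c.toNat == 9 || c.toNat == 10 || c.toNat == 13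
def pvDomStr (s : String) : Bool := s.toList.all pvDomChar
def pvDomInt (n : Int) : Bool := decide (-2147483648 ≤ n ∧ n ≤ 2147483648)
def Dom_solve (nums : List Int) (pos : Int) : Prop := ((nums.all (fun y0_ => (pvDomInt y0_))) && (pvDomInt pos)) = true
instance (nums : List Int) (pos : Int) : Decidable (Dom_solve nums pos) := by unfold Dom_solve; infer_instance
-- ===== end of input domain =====

-- B replaces A's per-index binary searches over the running-minimum array by two monotone
-- two-pointer sweeps from pos (O(n) instead of O(n log n)); values agree on 0 ≤ pos < len(nums).


-- ===== PORT A =====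
-- min(curr_min, nums[i]) where curr_min starts as math.inf: none models inf (exact: min(inf,x)=x)
def pvMinInf (c : Option Int) (x : Int) : Int :=
  match c with
  | none => x
  | some v => min v x

-- binsearch_right's while loop, soln threaded; A[mid] as pyGetD (exact: mid stays in [lo,hi] ⊆ range on all calls made)
def bsRightGo (A : List Int) (x lo hi soln : Int) : Int :=
  if _h : lo ≤ hi then
    let mid := lo + PySem.Int.floordiv (hi - lo) 2
    if x ≤ PySem.List.pyGetD A mid 0 then
      bsRightGo A x (mid + 1) hi (max soln mid)
    else
      bsRightGo A x lo (mid - 1) soln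
  else soln
termination_by (hi + 1 - lo).toNat
decreasing_by
  all_goals
    have hb := PySem.Int.floordiv_two_mid_bounds (lo := 0) (hi := hi - lo) (by omega)
    rw [zero_add] at hb
    omega

def binsearchRight (A : List Int) (lo hi x : Int) : Int := bsRightGo A x lo hi (lo - 1)

-- binsearch_left's while loop, soln threaded
def bsLeftGo (A : List Int) (x lo hi soln : Int) : Int :=
  if _h : lo ≤ hi then
    let mid := lo + PySem.Int.floordiv (hi - lo) 2
    if x ≤ PySem.List.pyGetD A mid 0 then
      bsLeftGo A x lo (mid - 1) (min soln mid)
    else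
      bsLeftGo A x (mid + 1) hi soln
  else soln
termination_by (hi + 1 - lo).toNat
decreasing_by
  all_goals
    have hb := PySem.Int.floordiv_two_mid_bounds (lo := 0) (hi := hi - lo) (by omega)
    rw [zero_add] at hb
    omega

def binsearchLeft (A : List Int) (lo hi x : Int) : Int := bsLeftGo A x lo hi (hi + 1)

-- A's fill-loop body: (curr_min, min_to_pos) ← write min at index i (index nonneg under Pre_, pySetD exact there)
def pvFillStep (nums : List Int) (st : Option Int × List Int) (i : Int) : Option Int × List Int :=
  let v := pvMinInf st.1 (PySem.List.pyGetD nums i 0)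
  (some v, PySem.List.pySetD st.2 i v)

def solve (nums : List Int) (pos : Int) : Int :=
  let n : Int := nums.length
  -- [inf for _ in nums]: placeholder 0 models inf; under Pre_ every entry is overwritten before being read
  let mtp0 : List Int := List.replicate nums.length 0
  let st1 := (PySem.List.pyRange pos (-1) (-1)).foldl (pvFillStep nums) (none, mtp0)
  let st2 := (PySem.List.pyRange pos n 1).foldl (pvFillStep nums) (none, st1.2)
  let M := st2.2
  (PySem.List.enumerate M).foldl
    (fun soln ik =>
      let i := ik.1
      let k := ik.2
      if i < pos then
        let j := binsearchRight M pos (n - 1) k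
        if j ≥ pos then max soln ((j - i + 1) * k) else soln
      else if i > pos then
        let j := binsearchLeft M 0 pos k
        if j ≤ pos then max soln ((i - j + 1) * k) else soln
      else soln)
    (PySem.List.pyGetD nums pos 0)

-- ===== PORT B =====
-- while d < n-pos-1 and right[d+1] >= k: d += 1
def advR (right : List Int) (n pos k d : Int) : Int :=
  if _h : d < n - pos - 1 ∧ k ≤ PySem.List.pyGetD right (d + 1) 0 then
    advR right n pos k (d + 1)
  else d
termination_by (n - pos - 1 - d).toNat
decreasing_by omega

-- while e < pos and left[e+1] >= k: e += 1
def advL (left : List Int) (pos k e : Int) : Int :=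
  if _h : e < pos ∧ k ≤ PySem.List.pyGetD left (e + 1) 0 then
    advL left pos k (e + 1)
  else e
termination_by (pos - e).toNat
decreasing_by omega

def solve_alt (nums : List Int) (pos : Int) : Int :=
  let n : Int := nums.length
  let x0 := PySem.List.pyGetD nums pos 0
  -- left[a] = min(nums[pos-a:pos+1]); left[-1] read via pyGetD (exact: list nonempty)
  let left := (PySem.List.pyRange 1 (pos + 1) 1).foldl
    (fun acc a => acc ++ [min (PySem.List.pyGetD acc (-1) 0) (PySem.List.pyGetD nums (pos - a) 0)]) [x0]
  let right := (PySem.List.pyRange 1 (n - pos) 1).foldl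
    (fun acc b => acc ++ [min (PySem.List.pyGetD acc (-1) 0) (PySem.List.pyGetD nums (pos + b) 0)]) [x0]
  let s1 := (PySem.List.pyRange 1 (pos + 1) 1).foldl
    (fun (st : Int × Int) a =>
      let k := PySem.List.pyGetD left a 0
      let d := advR right n pos k st.2
      (max st.1 ((a + d + 1) * k), d)) (x0, 0)
  let s2 := (PySem.List.pyRange 1 (n - pos) 1).foldl
    (fun (st : Int × Int) b =>
      let k := PySem.List.pyGetD right b 0
      let e := advL left pos k st.2
      (max st.1 ((b + e + 1) * k), e)) (s1.1, 0)
  s2.1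

-- ===== PRECONDITION & SPEC =====
-- Pre_ restricts to the natural domain 0 ≤ pos < len(nums): outside it A raises IndexError
-- (pos ≥ len or pos < -len) or, for -len ≤ pos < 0, returns a value that is an artefact of
-- Python's negative-index wraparound combined with leftover inf entries in min_to_pos.
def Pre_solve (nums : List Int) (pos : Int) : Prop := 0 ≤ pos ∧ pos < nums.length
instance (nums : List Int) (pos : Int) : Decidable (Pre_solve nums pos) := by
  unfold Pre_solve; infer_instance

def pvWitness_solve : List Int × Int := ([3, 1, 2], 1)

def Spec_solve (nums : List Int) (pos : Int) (out : Int) : Prop := out = solve_alt nums pos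
instance (nums : List Int) (pos : Int) (out : Int) : Decidable (Spec_solve nums pos out) := by
  unfold Spec_solve; infer_instance

-- ===== CLAIM (what is proved, stated in full; the proofs are below) =====
def Claim_equal_solve : Prop := ∀ (nums : List Int) (pos : Int), Dom_solve nums pos → Pre_solve nums pos → Spec_solve nums pos (solve nums pos)

-- ===== LEMMAS AND PROOFS =====

-- shorthand for nums[i] (total read; all uses are in range)
def gD (nums : List Int) (i : Int) : Int := PySem.List.pyGetD nums i 0

-- refL nums p a = min(nums[p-a..p]); refR nums p b = min(nums[p..p+b])
def refL (nums : List Int) (p : Nat) : Nat → Int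
  | 0 => gD nums p
  | a + 1 => min (refL nums p a) (gD nums ((p : Int) - ((a : Int) + 1)))

def refR (nums : List Int) (p : Nat) : Nat → Int
  | 0 => gD nums p
  | b + 1 => min (refR nums p b) (gD nums ((p : Int) + ((b : Int) + 1)))

theorem refL_anti (nums : List Int) (p : Nat) {a a' : Nat} (h : a ≤ a') :
    refL nums p a' ≤ refL nums p a := by
  induction a' with
  | zero => simp_all
  | succ m ih =>
    rcases Nat.eq_or_lt_of_le h with h1 | h1
    · subst h1; rfl
    · exact le_trans (min_le_left _ _) (ih (by omega))

theorem refR_anti (nums : List Int) (p : Nat) {b b' : Nat} (h : b ≤ b') :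
    refR nums p b' ≤ refR nums p b := by
  induction b' with
  | zero => simp_all
  | succ m ih =>
    rcases Nat.eq_or_lt_of_le h with h1 | h1
    · subst h1; rfl
    · exact le_trans (min_le_left _ _) (ih (by omega))

-- grG f k m = greatest t ≤ m with k ≤ f t (0 if none)
def grG (f : Nat → Int) (k : Int) : Nat → Nat
  | 0 => 0
  | m + 1 => if k ≤ f (m + 1) then m + 1 else grG f k m

theorem grG_le (f : Nat → Int) (k : Int) (m : Nat) : grG f k m ≤ m := by
  induction m with
  | zero => simp [grG]
  | succ m ih => simp only [grG]; split <;> omega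

theorem grG_ge (f : Nat → Int) (k : Int) (m : Nat) (h0 : k ≤ f 0) : k ≤ f (grG f k m) := by
  induction m with
  | zero => simpa [grG]
  | succ m ih => simp only [grG]; split <;> simp_all

theorem grG_greatest (f : Nat → Int) (k : Int) {m t : Nat} (ht : t ≤ m) (h : k ≤ f t) :
    t ≤ grG f k m := by
  induction m with
  | zero => omega
  | succ m ih =>
    simp only [grG]; split
    · omega
    · rcases Nat.eq_or_lt_of_le ht with h1 | h1
      · subst h1; simp_all
      · exact le_trans (ih (by omega)) (le_refl _)

-- bsRightGo returns max(soln, greatest index in [lo,hi] satisfying the (downward-closed) test, or lo-1)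
theorem bsRightGo_spec (A : List Int) (x : Int) :
    ∀ (N : Nat) (lo hi soln : Int), (hi + 1 - lo).toNat ≤ N →
    lo - 1 ≤ soln →
    (∀ i j : Int, lo ≤ i → i ≤ j → j ≤ hi → x ≤ PySem.List.pyGetD A j 0 → x ≤ PySem.List.pyGetD A i 0) →
    ∃ r : Int, bsRightGo A x lo hi soln = max soln r ∧
      ((r = lo - 1 ∧ ∀ j : Int, lo ≤ j → j ≤ hi → ¬ x ≤ PySem.List.pyGetD A j 0) ∨
       (lo ≤ r ∧ r ≤ hi ∧ x ≤ PySem.List.pyGetD A r 0 ∧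
        ∀ j : Int, r < j → j ≤ hi → ¬ x ≤ PySem.List.pyGetD A j 0)) := by
  intro N
  induction N with
  | zero =>
    intro lo hi soln hN hs _
    rw [bsRightGo]
    rw [dif_neg (by omega)]
    exact ⟨lo - 1, by omega, Or.inl ⟨rfl, by omega⟩⟩
  | succ N ih =>
    intro lo hi soln hN hs mono
    rw [bsRightGo]
    by_cases hlh : lo ≤ hi
    · rw [dif_pos hlh]
      have hb := PySem.Int.floordiv_two_mid_bounds (lo := 0) (hi := hi - lo) (by omega)
      rw [zero_add] at hb
      set mid := lo + PySem.Int.floordiv (hi - lo) 2 with hmid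
      have hmlo : lo ≤ mid := by omega
      have hmhi : mid ≤ hi := by omega
      by_cases hP : x ≤ PySem.List.pyGetD A mid 0
      · rw [if_pos hP]
        obtain ⟨r', hr', hd⟩ := ih (mid + 1) hi (max soln mid) (by omega) (by omega)
          (fun i j h1 h2 h3 h4 => mono i j (by omega) h2 h3 h4)
        refine ⟨max mid r', by rw [hr']; omega, Or.inr ?_⟩
        rcases hd with ⟨he, hnone⟩ | ⟨h1, h2, h3, h4⟩
        · have : max mid r' = mid := by omega
          rw [this]
          exact ⟨hmlo, hmhi, hP, fun j hj1 hj2 => hnone j (by omega) hj2⟩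
        · have : max mid r' = r' := by omega
          rw [this]
          exact ⟨by omega, h2, h3, h4⟩
      · rw [if_neg hP]
        obtain ⟨r', hr', hd⟩ := ih lo (mid - 1) soln (by omega) hs
          (fun i j h1 h2 h3 h4 => mono i j h1 h2 (by omega) h4)
        have hkill : ∀ j : Int, mid ≤ j → j ≤ hi → ¬ x ≤ PySem.List.pyGetD A j 0 :=
          fun j hj1 hj2 hPj => hP (mono mid j hmlo hj1 hj2 hPj)
        refine ⟨r', hr', ?_⟩
        rcases hd with ⟨he, hnone⟩ | ⟨h1, h2, h3, h4⟩
        · exact Or.inl ⟨he, fun j hj1 hj2 => by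
            by_cases hc : j ≤ mid - 1
            · exact hnone j hj1 hc
            · exact hkill j (by omega) hj2⟩
        · refine Or.inr ⟨h1, by omega, h3, fun j hj1 hj2 => ?_⟩
          by_cases hc : j ≤ mid - 1
          · exact h4 j hj1 hc
          · exact hkill j (by omega) hj2
    · rw [dif_neg hlh]
      exact ⟨lo - 1, by omega, Or.inl ⟨rfl, by omega⟩⟩

-- bsLeftGo returns min(soln, least index in [lo,hi] satisfying the (upward-closed) test, or hi+1)
theorem bsLeftGo_spec (A : List Int) (x : Int) :
    ∀ (N : Nat) (lo hi soln : Int), (hi + 1 - lo).toNat ≤ N →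
    soln ≤ hi + 1 →
    (∀ i j : Int, lo ≤ i → i ≤ j → j ≤ hi → x ≤ PySem.List.pyGetD A i 0 → x ≤ PySem.List.pyGetD A j 0) →
    ∃ r : Int, bsLeftGo A x lo hi soln = min soln r ∧
      ((r = hi + 1 ∧ ∀ j : Int, lo ≤ j → j ≤ hi → ¬ x ≤ PySem.List.pyGetD A j 0) ∨
       (lo ≤ r ∧ r ≤ hi ∧ x ≤ PySem.List.pyGetD A r 0 ∧
        ∀ j : Int, lo ≤ j → j < r → ¬ x ≤ PySem.List.pyGetD A j 0)) := by
  intro N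
  induction N with
  | zero =>
    intro lo hi soln hN hs _
    rw [bsLeftGo]
    rw [dif_neg (by omega)]
    exact ⟨hi + 1, by omega, Or.inl ⟨rfl, by omega⟩⟩
  | succ N ih =>
    intro lo hi soln hN hs mono
    rw [bsLeftGo]
    by_cases hlh : lo ≤ hi
    · rw [dif_pos hlh]
      have hb := PySem.Int.floordiv_two_mid_bounds (lo := 0) (hi := hi - lo) (by omega)
      rw [zero_add] at hb
      set mid := lo + PySem.Int.floordiv (hi - lo) 2 with hmid
      have hmlo : lo ≤ mid := by omega
      have hmhi : mid ≤ hi := by omega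
      by_cases hP : x ≤ PySem.List.pyGetD A mid 0
      · rw [if_pos hP]
        obtain ⟨r', hr', hd⟩ := ih lo (mid - 1) (min soln mid) (by omega) (by omega)
          (fun i j h1 h2 h3 h4 => mono i j h1 h2 (by omega) h4)
        refine ⟨min mid r', by rw [hr']; omega, Or.inr ?_⟩
        rcases hd with ⟨he, hnone⟩ | ⟨h1, h2, h3, h4⟩
        · have : min mid r' = mid := by omega
          rw [this]
          exact ⟨hmlo, hmhi, hP, fun j hj1 hj2 => hnone j hj1 (by omega)⟩
        · have : min mid r' = r' := by omega
          rw [this]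
          exact ⟨h1, by omega, h3, h4⟩
      · rw [if_neg hP]
        obtain ⟨r', hr', hd⟩ := ih (mid + 1) hi soln (by omega) (by omega)
          (fun i j h1 h2 h3 h4 => mono i j (by omega) h2 h3 h4)
        have hkill : ∀ j : Int, lo ≤ j → j ≤ mid → ¬ x ≤ PySem.List.pyGetD A j 0 :=
          fun j hj1 hj2 hPj => hP (mono j mid hj1 hj2 hmhi hPj)
        refine ⟨r', hr', ?_⟩
        rcases hd with ⟨he, hnone⟩ | ⟨h1, h2, h3, h4⟩
        · exact Or.inl ⟨he, fun j hj1 hj2 => by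
            by_cases hc : mid + 1 ≤ j
            · exact hnone j hc hj2
            · exact hkill j hj1 (by omega)⟩
        · refine Or.inr ⟨by omega, h2, h3, fun j hj1 hj2 => ?_⟩
          by_cases hc : mid + 1 ≤ j
          · exact h4 j hc hj2
          · exact hkill j hj1 (by omega)
    · rw [dif_neg hlh]
      exact ⟨hi + 1, by omega, Or.inl ⟨rfl, by omega⟩⟩

-- advR stops at the last index (≤ n-pos-1) whose value still admits k, given values f via the list
theorem advR_spec (right : List Int) (n pos k : Int) (f : Nat → Int)
    (hvals : ∀ t : Int, 0 ≤ t → t ≤ n - pos - 1 → PySem.List.pyGetD right t 0 = f t.toNat) :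
    ∀ (N : Nat) (d : Int), (n - pos - 1 - d).toNat ≤ N → 0 ≤ d → d ≤ n - pos - 1 → k ≤ f d.toNat →
    d ≤ advR right n pos k d ∧ advR right n pos k d ≤ n - pos - 1 ∧
      k ≤ f (advR right n pos k d).toNat ∧
      (advR right n pos k d = n - pos - 1 ∨ ¬ k ≤ f ((advR right n pos k d).toNat + 1)) := by
  intro N
  induction N with
  | zero =>
    intro d hN h0 hd hk
    have hde : d = n - pos - 1 := by omega
    rw [advR, dif_neg (by omega)]
    exact ⟨le_refl _, by omega, hk, Or.inl hde⟩
  | succ N ih =>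
    intro d hN h0 hd hk
    rw [advR]
    by_cases hstop : d = n - pos - 1
    · rw [dif_neg (by omega)]
      exact ⟨le_refl _, by omega, hk, Or.inl hstop⟩
    · have hv : PySem.List.pyGetD right (d + 1) 0 = f (d + 1).toNat := hvals (d + 1) (by omega) (by omega)
      by_cases hnext : k ≤ f (d + 1).toNat
      · rw [dif_pos ⟨by omega, by rw [hv]; exact hnext⟩]
        have := ih (d + 1) (by omega) (by omega) (by omega) hnext
        exact ⟨by omega, this.2.1, this.2.2.1, this.2.2.2⟩
      · rw [dif_neg (by rw [hv]; exact fun hc => hnext hc.2)]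
        have : (d + 1).toNat = d.toNat + 1 := by omega
        rw [this] at hnext
        exact ⟨le_refl _, hd, hk, Or.inr hnext⟩

theorem advL_spec (left : List Int) (pos k : Int) (f : Nat → Int)
    (hvals : ∀ t : Int, 0 ≤ t → t ≤ pos → PySem.List.pyGetD left t 0 = f t.toNat) :
    ∀ (N : Nat) (e : Int), (pos - e).toNat ≤ N → 0 ≤ e → e ≤ pos → k ≤ f e.toNat →
    e ≤ advL left pos k e ∧ advL left pos k e ≤ pos ∧
      k ≤ f (advL left pos k e).toNat ∧
      (advL left pos k e = pos ∨ ¬ k ≤ f ((advL left pos k e).toNat + 1)) := by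
  intro N
  induction N with
  | zero =>
    intro e hN h0 he hk
    have hee : e = pos := by omega
    rw [advL, dif_neg (by omega)]
    exact ⟨le_refl _, by omega, hk, Or.inl hee⟩
  | succ N ih =>
    intro e hN h0 he hk
    rw [advL]
    by_cases hstop : e = pos
    · rw [dif_neg (by omega)]
      exact ⟨le_refl _, by omega, hk, Or.inl hstop⟩
    · have hv : PySem.List.pyGetD left (e + 1) 0 = f (e + 1).toNat := hvals (e + 1) (by omega) (by omega)
      by_cases hnext : k ≤ f (e + 1).toNat
      · rw [dif_pos ⟨by omega, by rw [hv]; exact hnext⟩]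
        have := ih (e + 1) (by omega) (by omega) (by omega) hnext
        exact ⟨by omega, this.2.1, this.2.2.1, this.2.2.2⟩
      · rw [dif_neg (by rw [hv]; exact fun hc => hnext hc.2)]
        have : (e + 1).toNat = e.toNat + 1 := by omega
        rw [this] at hnext
        exact ⟨le_refl _, he, hk, Or.inr hnext⟩

-- a "last admitted index" is unique: it must be grG f k m, for antitone f
theorem greatest_eq (f : Nat → Int) (k : Int) (m : Nat)
    (anti : ∀ {t t' : Nat}, t ≤ t' → f t' ≤ f t) (r : Nat) (hr1 : r ≤ m) (hr2 : k ≤ f r)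
    (hr3 : r = m ∨ ¬ k ≤ f (r + 1)) : r = grG f k m := by
  have hle : r ≤ grG f k m := grG_greatest f k hr1 hr2
  have hgl : grG f k m ≤ m := grG_le f k m
  rcases hr3 with h | h
  · omega
  · by_contra hne
    have hlt : r + 1 ≤ grG f k m := by omega
    have h0 : k ≤ f 0 := le_trans hr2 (anti (Nat.zero_le r))
    exact h (le_trans (grG_ge f k m h0) (anti hlt))

-- B's running-min lists are the maps of refL / refR over ranges
theorem bLeft_eq (nums : List Int) (p : Nat) (m : Nat) :
    (PySem.List.pyRange 1 ((m : Int) + 1) 1).foldl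
      (fun acc a => acc ++ [min (PySem.List.pyGetD acc (-1) 0) (PySem.List.pyGetD nums ((p : Int) - a) 0)])
      [gD nums (p : Int)]
    = (List.range (m + 1)).map (refL nums p) := by
  induction m with
  | zero =>
    rw [show ((0 : Nat) : Int) + 1 = 1 by norm_num, PySem.List.pyRange_one_eq_nil (by omega)]
    simp [refL, List.range_succ]
  | succ m ih =>
    rw [show ((m + 1 : Nat) : Int) + 1 = ((m : Int) + 1) + 1 by push_cast; ring,
        PySem.List.pyRange_one_succ_right (by omega), List.foldl_append, ih]
    rw [List.range_succ (n := m + 1), List.map_append]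
    simp only [List.foldl_cons, List.foldl_nil]
    rw [show (List.range (m + 1)).map (refL nums p)
          = (List.range m).map (refL nums p) ++ [refL nums p m] by rw [List.range_succ, List.map_append]; rfl]
    rw [PySem.List.pyGetD_neg_one_append_singleton]
    simp only [List.map_cons, List.map_nil]
    rw [show refL nums p (m + 1) = min (refL nums p m) (gD nums ((p : Int) - ((m : Int) + 1))) from rfl]
    simp only [gD]

theorem bRight_eq (nums : List Int) (p : Nat) (m : Nat) :
    (PySem.List.pyRange 1 ((m : Int) + 1) 1).foldl
      (fun acc b => acc ++ [min (PySem.List.pyGetD acc (-1) 0) (PySem.List.pyGetD nums ((p : Int) + b) 0)])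
      [gD nums (p : Int)]
    = (List.range (m + 1)).map (refR nums p) := by
  induction m with
  | zero =>
    rw [show ((0 : Nat) : Int) + 1 = 1 by norm_num, PySem.List.pyRange_one_eq_nil (by omega)]
    simp [refR, List.range_succ]
  | succ m ih =>
    rw [show ((m + 1 : Nat) : Int) + 1 = ((m : Int) + 1) + 1 by push_cast; ring,
        PySem.List.pyRange_one_succ_right (by omega), List.foldl_append, ih]
    rw [List.range_succ (n := m + 1), List.map_append]
    simp only [List.foldl_cons, List.foldl_nil]
    rw [show (List.range (m + 1)).map (refR nums p)
          = (List.range m).map (refR nums p) ++ [refR nums p m] by rw [List.range_succ, List.map_append]; rfl]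
    rw [PySem.List.pyGetD_neg_one_append_singleton]
    simp only [List.map_cons, List.map_nil]
    rw [show refR nums p (m + 1) = min (refR nums p m) (gD nums ((p : Int) + ((m : Int) + 1))) from rfl]
    simp only [gD]

-- read an entry of a mapped range
theorem getD_map_range (f : Nat → Int) (m : Nat) (t : Int) (h1 : 0 ≤ t) (h2 : t < (m : Int)) :
    PySem.List.pyGetD ((List.range m).map f) t 0 = f t.toNat := by
  rw [PySem.List.pyGetD_eq_getElem ((List.range m).map f) 0 h1 (by simpa using h2)]
  simp

-- the value stored at index i of A's min_to_pos once both fill loops ran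
def mval (nums : List Int) (p i : Nat) : Int :=
  if i < p then refL nums p (p - i) else refR nums p (i - p)

theorem fill1_aux (nums : List Int) (p : Nat) (hp : p < nums.length) :
    ∀ m : Nat, m ≤ p + 1 →
    (((List.range m).foldl (fun st (k : Nat) => pvFillStep nums st ((p : Int) - (k : Int)))
        (none, List.replicate nums.length 0)).2.length = nums.length ∧
     (∀ i : Nat, i < nums.length →
        PySem.List.pyGetD ((List.range m).foldl (fun st (k : Nat) => pvFillStep nums st ((p : Int) - (k : Int)))
          (none, List.replicate nums.length 0)).2 (i : Int) 0
        = if p < i + m ∧ i ≤ p then refL nums p (p - i) else 0) ∧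
     ((List.range m).foldl (fun st (k : Nat) => pvFillStep nums st ((p : Int) - (k : Int)))
        (none, List.replicate nums.length 0)).1
      = if m = 0 then none else some (refL nums p (m - 1))) := by
  intro m
  induction m with
  | zero =>
    intro _
    refine ⟨by simp, fun i hi => ?_, by simp⟩
    rw [if_neg (by omega)]
    rw [PySem.List.pyGetD_eq_getElem _ 0 (by omega) (by simpa using hi)]
    simp
  | succ m ih =>
    intro hm
    obtain ⟨hlen, hget, hfst⟩ := ih (by omega)
    rw [List.range_succ, List.foldl_append, List.foldl_cons, List.foldl_nil]
    set st := (List.range m).foldl (fun st (k : Nat) => pvFillStep nums st ((p : Int) - (k : Int)))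
      (none, List.replicate nums.length 0) with hst
    have hidx : (p : Int) - (m : Int) = ((p - m : Nat) : Int) := by omega
    have hv : pvMinInf st.1 (PySem.List.pyGetD nums ((p : Int) - (m : Int)) 0) = refL nums p m := by
      rw [hfst]
      cases m with
      | zero => simp [pvMinInf, refL, gD]
      | succ m' =>
        rw [if_neg (by omega)]
        simp only [pvMinInf]
        rw [show refL nums p (m' + 1) = min (refL nums p m')
              (gD nums ((p : Int) - ((m' : Int) + 1))) from rfl]
        simp only [gD]
        norm_num
    refine ⟨?_, fun i hi => ?_, ?_⟩
    · simp [pvFillStep, PySem.List.length_pySetD, hlen]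
    · simp only [pvFillStep]
      rw [hv, hidx]
      rw [PySem.List.pyGetD_pySetD_natCast st.2 (p - m) i _ 0 (by omega)]
      by_cases hc : i = p - m
      · rw [if_pos hc, if_pos (by omega)]
        rw [show p - i = m by omega]
      · rw [if_neg hc, hget i hi]
        by_cases hc2 : p < i + m ∧ i ≤ p
        · rw [if_pos hc2, if_pos (show p < i + (m + 1) ∧ i ≤ p by omega)]
        · rw [if_neg hc2, if_neg (show ¬(p < i + (m + 1) ∧ i ≤ p) by omega)]
    · simp [pvFillStep, hv]

theorem fill2_aux (nums : List Int) (p : Nat) (hp : p < nums.length) (L1 : List Int)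
    (hL1len : L1.length = nums.length)
    (hL1 : ∀ i : Nat, i < nums.length →
      PySem.List.pyGetD L1 (i : Int) 0 = if i ≤ p then refL nums p (p - i) else 0) :
    ∀ m : Nat, m ≤ nums.length - p →
    (((List.range m).foldl (fun st (k : Nat) => pvFillStep nums st ((p : Int) + (k : Int))) (none, L1)).2.length
        = nums.length ∧
     (∀ i : Nat, i < nums.length →
        PySem.List.pyGetD ((List.range m).foldl (fun st (k : Nat) => pvFillStep nums st ((p : Int) + (k : Int)))
          (none, L1)).2 (i : Int) 0
        = if p ≤ i ∧ i < p + m then refR nums p (i - p)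
          else if i ≤ p then refL nums p (p - i) else 0) ∧
     ((List.range m).foldl (fun st (k : Nat) => pvFillStep nums st ((p : Int) + (k : Int))) (none, L1)).1
      = if m = 0 then none else some (refR nums p (m - 1))) := by
  intro m
  induction m with
  | zero =>
    intro _
    refine ⟨by simpa, fun i hi => ?_, by simp⟩
    simp only [List.range_zero, List.foldl_nil]
    rw [if_neg (by omega), hL1 i hi]
  | succ m ih =>
    intro hm
    obtain ⟨hlen, hget, hfst⟩ := ih (by omega)
    rw [List.range_succ, List.foldl_append, List.foldl_cons, List.foldl_nil]
    set st := (List.range m).foldl (fun st (k : Nat) => pvFillStep nums st ((p : Int) + (k : Int))) (none, L1)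
      with hst
    have hidx : (p : Int) + (m : Int) = ((p + m : Nat) : Int) := by omega
    have hv : pvMinInf st.1 (PySem.List.pyGetD nums ((p : Int) + (m : Int)) 0) = refR nums p m := by
      rw [hfst]
      cases m with
      | zero => simp [pvMinInf, refR, gD]
      | succ m' =>
        rw [if_neg (by omega)]
        simp only [pvMinInf]
        rw [show refR nums p (m' + 1) = min (refR nums p m')
              (gD nums ((p : Int) + ((m' : Int) + 1))) from rfl]
        simp only [gD]
        norm_num
    refine ⟨?_, fun i hi => ?_, ?_⟩
    · simp [pvFillStep, PySem.List.length_pySetD, hlen]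
    · simp only [pvFillStep]
      rw [hv, hidx]
      rw [PySem.List.pyGetD_pySetD_natCast st.2 (p + m) i _ 0 (by omega)]
      by_cases hc : i = p + m
      · rw [if_pos hc, if_pos (by omega)]
        rw [show i - p = m by omega]
      · rw [if_neg hc, hget i hi]
        by_cases hc2 : p ≤ i ∧ i < p + m
        · rw [if_pos hc2, if_pos (show p ≤ i ∧ i < p + (m + 1) by omega)]
        · rw [if_neg hc2, if_neg (show ¬(p ≤ i ∧ i < p + (m + 1)) by omega)]
    · simp [pvFillStep, hv]

-- the two pointer anchors: greatest right/left extension whose running min still admits k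
def GRr (nums : List Int) (p : Nat) (k : Int) : Nat := grG (refR nums p) k (nums.length - 1 - p)
def GRl (nums : List Int) (p : Nat) (k : Int) : Nat := grG (refL nums p) k p

-- the candidate value contributed by extending a to the left / b to the right of p
def candL (nums : List Int) (p : Nat) (a : Nat) : Int :=
  ((a : Int) + (GRr nums p (refL nums p a) : Int) + 1) * refL nums p a
def candR (nums : List Int) (p : Nat) (b : Nat) : Int :=
  ((b : Int) + (GRl nums p (refR nums p b) : Int) + 1) * refR nums p b

theorem refL_zero_eq_refR_zero (nums : List Int) (p : Nat) : refL nums p 0 = refR nums p 0 := rfl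

theorem mval_left (nums : List Int) (p i : Nat) (h : i ≤ p) :
    mval nums p i = refL nums p (p - i) := by
  unfold mval
  by_cases hc : i < p
  · rw [if_pos hc]
  · rw [if_neg hc, show i - p = 0 by omega, show p - i = 0 by omega]
    rfl

theorem binsearchRight_eq (nums : List Int) (p : Nat) (hp : p < nums.length) (M : List Int)
    (hMlen : M.length = nums.length)
    (hM : ∀ i : Nat, i < nums.length → PySem.List.pyGetD M (i : Int) 0 = mval nums p i)
    (k : Int) (hk : k ≤ refR nums p 0) :
    binsearchRight M (p : Int) ((nums.length : Int) - 1) k = (p : Int) + (GRr nums p k : Int) := by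
  unfold binsearchRight
  have mono : ∀ i j : Int, (p : Int) ≤ i → i ≤ j → j ≤ (nums.length : Int) - 1 →
      k ≤ PySem.List.pyGetD M j 0 → k ≤ PySem.List.pyGetD M i 0 := by
    intro i j h1 h2 h3 h4
    have hiv : PySem.List.pyGetD M i 0 = mval nums p i.toNat := by
      rw [show i = ((i.toNat : Nat) : Int) by omega]; exact hM i.toNat (by omega)
    have hjv : PySem.List.pyGetD M j 0 = mval nums p j.toNat := by
      rw [show j = ((j.toNat : Nat) : Int) by omega]; exact hM j.toNat (by omega)
    rw [hiv]; rw [hjv] at h4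
    unfold mval at *
    rw [if_neg (by omega)] at h4 ⊢
    exact le_trans h4 (refR_anti nums p (by omega))
  obtain ⟨r, hr, hd⟩ := bsRightGo_spec M k ((nums.length : Int) - (p : Int)).toNat
    (p : Int) ((nums.length : Int) - 1) ((p : Int) - 1) (by omega) (by omega) mono
  have hPp : k ≤ PySem.List.pyGetD M (p : Int) 0 := by
    rw [hM p hp]
    unfold mval
    rw [if_neg (by omega), show p - p = 0 by omega]
    exact hk
  rcases hd with ⟨_, hnone⟩ | ⟨h1, h2, h3, h4⟩
  · exact absurd hPp (hnone (p : Int) (le_refl _) (by omega))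
  · rw [hr, show max ((p : Int) - 1) r = r by omega]
    have hrv : PySem.List.pyGetD M r 0 = refR nums p (r.toNat - p) := by
      rw [show r = ((r.toNat : Nat) : Int) by omega, hM r.toNat (by omega)]
      unfold mval
      rw [if_neg (by omega), Int.toNat_natCast]
    have hgr : r.toNat - p = GRr nums p k := by
      apply greatest_eq (refR nums p) k (nums.length - 1 - p)
        (fun h => refR_anti nums p h) _ (by omega) (by rw [hrv] at h3; exact h3)
      by_cases hend : r = (nums.length : Int) - 1
      · exact Or.inl (by omega)
      · refine Or.inr ?_
        have := h4 (r + 1) (by omega) (by omega)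
        rw [show r + 1 = (((r.toNat + 1) : Nat) : Int) by omega, hM (r.toNat + 1) (by omega)] at this
        unfold mval at this
        rw [if_neg (by omega)] at this
        rw [show r.toNat + 1 - p = (r.toNat - p) + 1 by omega] at this
        exact this
    omega

theorem binsearchLeft_eq (nums : List Int) (p : Nat) (hp : p < nums.length) (M : List Int)
    (hMlen : M.length = nums.length)
    (hM : ∀ i : Nat, i < nums.length → PySem.List.pyGetD M (i : Int) 0 = mval nums p i)
    (k : Int) (hk : k ≤ refL nums p 0) :
    binsearchLeft M 0 (p : Int) k = (p : Int) - (GRl nums p k : Int) := by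
  unfold binsearchLeft
  have hval : ∀ i : Int, 0 ≤ i → i ≤ (p : Int) →
      PySem.List.pyGetD M i 0 = refL nums p (p - i.toNat) := by
    intro i h1 h2
    rw [show i = ((i.toNat : Nat) : Int) by omega, hM i.toNat (by omega),
        mval_left nums p i.toNat (by omega), Int.toNat_natCast]
  have mono : ∀ i j : Int, (0 : Int) ≤ i → i ≤ j → j ≤ (p : Int) →
      k ≤ PySem.List.pyGetD M i 0 → k ≤ PySem.List.pyGetD M j 0 := by
    intro i j h1 h2 h3 h4
    rw [hval j (by omega) h3]
    rw [hval i h1 (by omega)] at h4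
    exact le_trans h4 (refL_anti nums p (by omega))
  obtain ⟨r, hr, hd⟩ := bsLeftGo_spec M k ((p : Int) + 1).toNat 0 (p : Int) ((p : Int) + 1)
    (by omega) (by omega) mono
  have hPp : k ≤ PySem.List.pyGetD M (p : Int) 0 := by
    rw [hval (p : Int) (by omega) (le_refl _), show p - ((p : Int)).toNat = 0 by omega]
    exact hk
  rcases hd with ⟨_, hnone⟩ | ⟨h1, h2, h3, h4⟩
  · exact absurd hPp (hnone (p : Int) (by omega) (le_refl _))
  · rw [hr, show min ((p : Int) + 1) r = r by omega]
    have hgr : p - r.toNat = GRl nums p k := by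
      apply greatest_eq (refL nums p) k p (fun h => refL_anti nums p h) _ (by omega)
        (by rw [hval r h1 h2] at h3; exact h3)
      by_cases hend : r = 0
      · exact Or.inl (by omega)
      · refine Or.inr ?_
        have := h4 (r - 1) (by omega) (by omega)
        rw [hval (r - 1) (by omega) (by omega)] at this
        rw [show p - (r - 1).toNat = (p - r.toNat) + 1 by omega] at this
        exact this
    omega

-- the pointer advances land on the same anchors
theorem advR_eq (nums : List Int) (p : Nat) (hp : p < nums.length) (k : Int) (d : Int)
    (h0 : 0 ≤ d) (hd : d ≤ (nums.length : Int) - (p : Int) - 1) (hk : k ≤ refR nums p d.toNat) :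
    advR ((List.range (nums.length - p)).map (refR nums p)) (nums.length : Int) (p : Int) k d
      = (GRr nums p k : Int) := by
  have hvals : ∀ t : Int, 0 ≤ t → t ≤ (nums.length : Int) - (p : Int) - 1 →
      PySem.List.pyGetD ((List.range (nums.length - p)).map (refR nums p)) t 0 = refR nums p t.toNat :=
    fun t h1 h2 => getD_map_range (refR nums p) (nums.length - p) t h1 (by omega)
  obtain ⟨h1, h2, h3, h4⟩ := advR_spec _ (nums.length : Int) (p : Int) k (refR nums p) hvals
    ((nums.length : Int) - (p : Int) - 1 - d).toNat d (le_refl _) h0 hd hk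
  set r := advR ((List.range (nums.length - p)).map (refR nums p)) (nums.length : Int) (p : Int) k d
  have : r.toNat = GRr nums p k := by
    apply greatest_eq (refR nums p) k (nums.length - 1 - p) (fun h => refR_anti nums p h) _
      (by omega) h3
    rcases h4 with h | h
    · exact Or.inl (by omega)
    · exact Or.inr h
  omega

theorem advL_eq (nums : List Int) (p : Nat) (k : Int) (e : Int)
    (h0 : 0 ≤ e) (he : e ≤ (p : Int)) (hk : k ≤ refL nums p e.toNat) :
    advL ((List.range (p + 1)).map (refL nums p)) (p : Int) k e = (GRl nums p k : Int) := by
  have hvals : ∀ t : Int, 0 ≤ t → t ≤ (p : Int) →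
      PySem.List.pyGetD ((List.range (p + 1)).map (refL nums p)) t 0 = refL nums p t.toNat :=
    fun t h1 h2 => getD_map_range (refL nums p) (p + 1) t h1 (by omega)
  obtain ⟨h1, h2, h3, h4⟩ := advL_spec _ (p : Int) k (refL nums p) hvals
    ((p : Int) - e).toNat e (le_refl _) h0 he hk
  set r := advL ((List.range (p + 1)).map (refL nums p)) (p : Int) k e
  have : r.toNat = GRl nums p k := by
    apply greatest_eq (refL nums p) k p (fun h => refL_anti nums p h) _ (by omega) h3
    rcases h4 with h | h
    · exact Or.inl (by omega)
    · exact Or.inr h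
  omega

-- B's first sweep: fold of left-extension candidates, pointer kept at the anchor
theorem bS1 (nums : List Int) (p : Nat) (hp : p < nums.length) :
    ∀ m : Nat, m ≤ p →
    ((PySem.List.pyRange 1 ((m : Int) + 1) 1).foldl
      (fun (st : Int × Int) a =>
        let k := PySem.List.pyGetD ((List.range (p + 1)).map (refL nums p)) a 0
        let d := advR ((List.range (nums.length - p)).map (refR nums p)) (nums.length : Int)
          (p : Int) k st.2
        (max st.1 ((a + d + 1) * k), d))
      (gD nums (p : Int), 0))
    = ((List.range' 1 m).foldl (fun s a => max s (candL nums p a)) (gD nums (p : Int)),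
       if m = 0 then 0 else (GRr nums p (refL nums p m) : Int)) := by
  intro m
  induction m with
  | zero =>
    intro _
    rw [show ((0 : Nat) : Int) + 1 = 1 by norm_num, PySem.List.pyRange_one_eq_nil (by omega)]
    simp
  | succ m ih =>
    intro hm
    rw [show ((m + 1 : Nat) : Int) + 1 = ((m : Int) + 1) + 1 by push_cast; ring,
        PySem.List.pyRange_one_succ_right (by omega), List.foldl_append, ih (by omega)]
    simp only [List.foldl_cons, List.foldl_nil]
    have hkval : PySem.List.pyGetD ((List.range (p + 1)).map (refL nums p)) ((m : Int) + 1) 0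
        = refL nums p (m + 1) := by
      rw [show (m : Int) + 1 = ((m + 1 : Nat) : Int) by push_cast; ring,
          getD_map_range _ _ _ (by omega) (by omega), Int.toNat_natCast]
    have hdprev : ∀ dp : Int, dp = (if m = 0 then 0 else (GRr nums p (refL nums p m) : Int)) →
        advR ((List.range (nums.length - p)).map (refR nums p)) (nums.length : Int) (p : Int)
          (refL nums p (m + 1)) dp = (GRr nums p (refL nums p (m + 1)) : Int) := by
      intro dp hdp
      have h0R : refL nums p m ≤ refR nums p 0 := by
        rw [← refL_zero_eq_refR_zero]
        exact refL_anti nums p (Nat.zero_le m)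
      cases m with
      | zero =>
        rw [hdp, if_pos rfl]
        have hk : refL nums p 1 ≤ refR nums p ((0 : Int)).toNat := by
          rw [show ((0 : Int)).toNat = 0 from rfl, ← refL_zero_eq_refR_zero]
          exact refL_anti nums p (by omega)
        exact advR_eq nums p hp _ 0 (le_refl 0) (by omega) hk
      | succ m' =>
        rw [hdp, if_neg (by omega)]
        have hd' : ((GRr nums p (refL nums p (m' + 1)) : Nat) : Int)
            ≤ (nums.length : Int) - (p : Int) - 1 := by
          have h := grG_le (refR nums p) (refL nums p (m' + 1)) (nums.length - 1 - p)
          unfold GRr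
          omega
        have hk : refL nums p (m' + 1 + 1)
            ≤ refR nums p (((GRr nums p (refL nums p (m' + 1)) : Nat) : Int)).toNat := by
          rw [Int.toNat_natCast]
          exact le_trans (refL_anti nums p (by omega)) (grG_ge _ _ _ h0R)
        exact advR_eq nums p hp _ _ (by positivity) hd' hk
    rw [hkval]
    rw [hdprev _ rfl]
    rw [List.range'_concat, List.foldl_append, List.foldl_cons, List.foldl_nil]
    simp only [Prod.mk.injEq]
    constructor
    · rw [show (1 : Nat) + 1 * m = m + 1 by omega]
      unfold candL
      congr 1
    · rw [if_neg (by omega)]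

-- B's second sweep, from an arbitrary accumulated best
theorem bS2 (nums : List Int) (p : Nat) (hp : p < nums.length) (s0 : Int) :
    ∀ m : Nat, m ≤ nums.length - p - 1 →
    ((PySem.List.pyRange 1 ((m : Int) + 1) 1).foldl
      (fun (st : Int × Int) b =>
        let k := PySem.List.pyGetD ((List.range (nums.length - p)).map (refR nums p)) b 0
        let e := advL ((List.range (p + 1)).map (refL nums p)) (p : Int) k st.2
        (max st.1 ((b + e + 1) * k), e))
      (s0, 0))
    = ((List.range' 1 m).foldl (fun s b => max s (candR nums p b)) s0,
       if m = 0 then 0 else (GRl nums p (refR nums p m) : Int)) := by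
  intro m
  induction m with
  | zero =>
    intro _
    rw [show ((0 : Nat) : Int) + 1 = 1 by norm_num, PySem.List.pyRange_one_eq_nil (by omega)]
    simp
  | succ m ih =>
    intro hm
    rw [show ((m + 1 : Nat) : Int) + 1 = ((m : Int) + 1) + 1 by push_cast; ring,
        PySem.List.pyRange_one_succ_right (by omega), List.foldl_append, ih (by omega)]
    simp only [List.foldl_cons, List.foldl_nil]
    have hkval : PySem.List.pyGetD ((List.range (nums.length - p)).map (refR nums p)) ((m : Int) + 1) 0
        = refR nums p (m + 1) := by
      rw [show (m : Int) + 1 = ((m + 1 : Nat) : Int) by push_cast; ring,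
          getD_map_range _ _ _ (by omega) (by omega), Int.toNat_natCast]
    have heprev : ∀ ep : Int, ep = (if m = 0 then 0 else (GRl nums p (refR nums p m) : Int)) →
        advL ((List.range (p + 1)).map (refL nums p)) (p : Int) (refR nums p (m + 1)) ep
          = (GRl nums p (refR nums p (m + 1)) : Int) := by
      intro ep hep
      have h0L : refR nums p m ≤ refL nums p 0 := by
        rw [refL_zero_eq_refR_zero]
        exact refR_anti nums p (Nat.zero_le m)
      cases m with
      | zero =>
        rw [hep, if_pos rfl]
        have hk : refR nums p 1 ≤ refL nums p ((0 : Int)).toNat := by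
          rw [show ((0 : Int)).toNat = 0 from rfl, refL_zero_eq_refR_zero]
          exact refR_anti nums p (by omega)
        exact advL_eq nums p _ 0 (le_refl 0) (by omega) hk
      | succ m' =>
        rw [hep, if_neg (by omega)]
        have he' : ((GRl nums p (refR nums p (m' + 1)) : Nat) : Int) ≤ (p : Int) := by
          have h := grG_le (refL nums p) (refR nums p (m' + 1)) p
          unfold GRl
          omega
        have hk : refR nums p (m' + 1 + 1)
            ≤ refL nums p (((GRl nums p (refR nums p (m' + 1)) : Nat) : Int)).toNat := by
          rw [Int.toNat_natCast]
          exact le_trans (refR_anti nums p (by omega)) (grG_ge _ _ _ h0L)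
        exact advL_eq nums p _ _ (by positivity) he' hk
    rw [hkval]
    rw [heprev _ rfl]
    rw [List.range'_concat, List.foldl_append, List.foldl_cons, List.foldl_nil]
    simp only [Prod.mk.injEq]
    constructor
    · rw [show (1 : Nat) + 1 * m = m + 1 by omega]
      unfold candR
      congr 1
    · rw [if_neg (by omega)]

theorem foldl_maxstep_eq_map (c : Nat → Int) (l : List Nat) (b : Int) :
    l.foldl (fun s a => max s (c a)) b = (l.map c).foldl max b := (List.foldl_map).symm

-- A's enumerate loop = max-fold of the left candidates then the right candidates
theorem aMain (nums : List Int) (p : Nat) (hp : p < nums.length) (M : List Int)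
    (hMlen : M.length = nums.length)
    (hM : ∀ i : Nat, i < nums.length → PySem.List.pyGetD M (i : Int) 0 = mval nums p i) :
    (PySem.List.enumerate M).foldl
      (fun soln ik =>
        let i := ik.1
        let k := ik.2
        if i < (p : Int) then
          let j := binsearchRight M (p : Int) ((nums.length : Int) - 1) k
          if j ≥ (p : Int) then max soln ((j - i + 1) * k) else soln
        else if i > (p : Int) then
          let j := binsearchLeft M 0 (p : Int) k
          if j ≤ (p : Int) then max soln ((i - j + 1) * k) else soln
        else soln)
      (gD nums (p : Int))
    = List.foldl max
        (List.foldl max (gD nums (p : Int))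
          (((List.range' 1 p).map (candL nums p)).reverse))
        ((List.range' 1 (nums.length - p - 1)).map (candR nums p)) := by
  rw [PySem.List.enumerate_eq_map_pyRange M 0]
  rw [show PySem.List.len M = (nums.length : Int) by simp [PySem.List.len, hMlen]]
  rw [List.foldl_map]
  rw [show PySem.List.pyRange 0 (nums.length : Int) 1
        = PySem.List.pyRange 0 (p : Int) 1 ++ (PySem.List.pyRange (p : Int) ((p : Int) + 1) 1
            ++ PySem.List.pyRange ((p : Int) + 1) (nums.length : Int) 1) by
      rw [← PySem.List.pyRange_one_append (p : Int) ((p : Int) + 1) (nums.length : Int)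
            (by omega) (by omega),
          ← PySem.List.pyRange_one_append 0 (p : Int) (nums.length : Int) (by omega) (by omega)]]
  rw [List.foldl_append, List.foldl_append]
  -- middle element: index p contributes nothing
  rw [PySem.List.pyRange_one_singleton, List.foldl_cons, List.foldl_nil]
  simp only [lt_irrefl, gt_iff_lt, if_false]
  -- left segment
  rw [PySem.List.foldl_congr_mem (PySem.List.pyRange 0 (p : Int) 1) _
      (fun soln j => max soln (candL nums p (p - j.toNat))) (gD nums (p : Int)) ?hseg1]
  case hseg1 =>
    intro acc j hj
    rw [PySem.List.mem_pyRange_one] at hj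
    have hkv : PySem.List.pyGetD M j 0 = refL nums p (p - j.toNat) := by
      rw [show j = ((j.toNat : Nat) : Int) by omega, hM j.toNat (by omega),
          mval_left nums p j.toNat (by omega), Int.toNat_natCast]
    dsimp only
    rw [if_pos (by omega : j < (p : Int)), hkv,
        binsearchRight_eq nums p hp M hMlen hM _
          (by rw [← refL_zero_eq_refR_zero]; exact refL_anti nums p (Nat.zero_le _)),
        if_pos (by omega : (p : Int) + (GRr nums p (refL nums p (p - j.toNat)) : Int) ≥ (p : Int))]
    unfold candL
    congr 1
    congr 1
    omega
  -- right segment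
  rw [PySem.List.foldl_congr_mem (PySem.List.pyRange ((p : Int) + 1) (nums.length : Int) 1) _
      (fun soln j => max soln (candR nums p (j.toNat - p))) _ ?hseg3]
  case hseg3 =>
    intro acc j hj
    rw [PySem.List.mem_pyRange_one] at hj
    have hkv : PySem.List.pyGetD M j 0 = refR nums p (j.toNat - p) := by
      rw [show j = ((j.toNat : Nat) : Int) by omega, hM j.toNat (by omega)]
      unfold mval
      rw [if_neg (by omega), Int.toNat_natCast]
    dsimp only
    rw [if_neg (by omega : ¬ j < (p : Int)), if_pos (by omega : j > (p : Int)), hkv,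
        binsearchLeft_eq nums p hp M hMlen hM _
          (by rw [refL_zero_eq_refR_zero]; exact refR_anti nums p (Nat.zero_le _)),
        if_pos (by
          have := grG_le (refL nums p) (refR nums p (j.toNat - p)) p
          unfold GRl
          omega : (p : Int) - (GRl nums p (refR nums p (j.toNat - p)) : Int) ≤ (p : Int))]
    unfold candR
    congr 1
    congr 1
    omega
  -- convert both segments to max-folds over mapped ranges
  rw [show PySem.List.pyRange 0 (p : Int) 1 = (List.range p).map (fun (k : Nat) => (k : Int)) from
      PySem.List.pyRange_zero_natCast p]
  rw [List.foldl_map]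
  rw [show PySem.List.pyRange ((p : Int) + 1) (nums.length : Int) 1
        = (List.range (nums.length - p - 1)).map (fun (k : Nat) => (p : Int) + 1 + (k : Int)) by
      rw [PySem.List.pyRange_one ((p : Int) + 1) (nums.length : Int),
          show ((nums.length : Int) - ((p : Int) + 1)).toNat = nums.length - p - 1 by omega]]
  rw [List.foldl_map]
  rw [PySem.List.foldl_congr_mem (List.range p) _
      (fun (s : Int) (k : Nat) => max s (candL nums p (p - k))) _
      (fun acc k _ => by rw [Int.toNat_natCast])]
  rw [PySem.List.foldl_congr_mem (List.range (nums.length - p - 1)) _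
      (fun (s : Int) (k : Nat) => max s (candR nums p (k + 1))) _
      (fun acc k _ => by rw [show (((p : Int) + 1 + (k : Int)).toNat - p) = k + 1 by omega])]
  rw [foldl_maxstep_eq_map, foldl_maxstep_eq_map]
  congr 1
  · congr 1
    rw [← List.map_reverse, List.reverse_range', List.map_map]
    apply List.map_congr_left
    intro a ha
    rw [List.mem_range] at ha
    simp only [Function.comp_apply]
    congr 1
    omega
  · rw [show List.range' 1 (nums.length - p - 1) = (List.range (nums.length - p - 1)).map (· + 1) by
        rw [List.range'_eq_map_range]; exact List.map_congr_left (fun x _ => by omega),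
      List.map_map]
    exact List.map_congr_left (fun x _ => rfl)

-- the assembled equivalence on the natural domain
theorem solve_eq (nums : List Int) (p : Nat) (hp : p < nums.length) :
    solve nums (p : Int) = solve_alt nums (p : Int) := by
  unfold solve solve_alt
  dsimp only
  simp only [show PySem.List.pyGetD nums ((p : Nat) : Int) 0 = gD nums (p : Int) from rfl]
  -- A's two fill loops, as folds over Nat ranges
  rw [PySem.List.pyRange_neg_one, show ((p : Int) - (-1)).toNat = p + 1 by omega, List.foldl_map]
  rw [PySem.List.pyRange_one (p : Int) (nums.length : Int),
      show ((nums.length : Int) - (p : Int)).toNat = nums.length - p by omega, List.foldl_map]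
  obtain ⟨hL1len, hL1get, -⟩ := fill1_aux nums p hp (p + 1) (le_refl _)
  have hcond : ∀ i : Nat, (if p < i + (p + 1) ∧ i ≤ p then refL nums p (p - i) else (0 : Int))
      = if i ≤ p then refL nums p (p - i) else 0 := by
    intro i
    by_cases hc : i ≤ p
    · rw [if_pos (show p < i + (p + 1) ∧ i ≤ p by omega), if_pos hc]
    · rw [if_neg (show ¬(p < i + (p + 1) ∧ i ≤ p) by omega), if_neg hc]
  have hL1get' := fun (i : Nat) (hi : i < nums.length) => (hL1get i hi).trans (hcond i)
  obtain ⟨hMlen, hMget, -⟩ := fill2_aux nums p hp _ hL1len hL1get' (nums.length - p) (le_refl _)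
  have hcond2 : ∀ i : Nat, i < nums.length →
      (if p ≤ i ∧ i < p + (nums.length - p) then refR nums p (i - p)
        else if i ≤ p then refL nums p (p - i) else (0 : Int)) = mval nums p i := by
    intro i hi
    unfold mval
    by_cases hc : i < p
    · rw [if_neg (by omega), if_pos (by omega), if_pos hc]
    · rw [if_pos (by omega), if_neg hc]
  have hM := fun (i : Nat) (hi : i < nums.length) => (hMget i hi).trans (hcond2 i hi)
  have aM := aMain nums p hp _ hMlen hM
  dsimp only at aM
  rw [aM]
  -- B's lists and sweeps
  rw [bLeft_eq nums p p]
  rw [show (nums.length : Int) - (p : Int) = ((nums.length - p - 1 : Nat) : Int) + 1 by omega]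
  rw [bRight_eq nums p (nums.length - p - 1),
      show nums.length - p - 1 + 1 = nums.length - p by omega]
  have hb1 := bS1 nums p hp p (le_refl p)
  dsimp only at hb1
  rw [hb1]
  dsimp only
  have hb2 := bS2 nums p hp (((List.range' 1 p).foldl (fun s a => max s (candL nums p a))
    (gD nums (p : Int)))) (nums.length - p - 1) (le_refl _)
  dsimp only at hb2
  rw [hb2]
  dsimp only
  rw [foldl_maxstep_eq_map, foldl_maxstep_eq_map]
  congr 1
  exact (((List.range' 1 p).map (candL nums p)).reverse_perm).foldl_eq (gD nums (p : Int))

-- ===== VERDICT (by name: the statement is the Claim_ definition above) =====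
theorem solve_spec : Claim_equal_solve := by
  unfold Claim_equal_solve
  intro nums pos hDom hPre
  unfold Spec_solve
  obtain ⟨h0, hlt⟩ := hPre
  rw [show pos = ((pos.toNat : Nat) : Int) by omega]
  exact solve_eq nums pos.toNat (by omega)
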